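-- pv_equiv track=rewrite | github.com/jhonatanwen/ifce | fundprog/resolucao_de_listas/lista7/l7q4.py | maiorColunaMenorLinha
-- ===== SOURCE A (Python) =====
-- from math import inf
--
-- def maiorColunaMenorLinha(matriz):
--     maior_coluna_lista = None
--     menor_linha_lista = None
--     soma_das_colunas = []
--     soma_das_linhas = []
--     maior_coluna = -inf
--     menor_linha = inf
--
--     for i in range(len(matriz)):
--         soma = 0
--         for j in range(len(matriz)):
--             soma = soma + matriz[i][j]
--
--         soma_das_linhas.append([i+1, soma])
--
--     for j in range(len(matriz)):
--         soma = 0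
--         for i in range(len(matriz)):
--            soma = soma + matriz[i][j]
--
--         soma_das_colunas.append([j+1, soma])
--
--     for soma in soma_das_colunas:
--         if(soma[1] > maior_coluna):
--             maior_coluna = soma[1]
--             maior_coluna_lista = soma
--
--     for soma in soma_das_linhas:
--         if(soma[1] < menor_linha):
--             menor_linha = soma[1]
--             menor_linha_lista = soma
--
--     return [maior_coluna_lista, menor_linha_lista]
-- ===== SOURCE B (Python) =====
-- def maiorColunaMenorLinha(matriz):
--     n = len(matriz)
--     col = [0] * n
--     best = None
--     for i, row in enumerate(matriz, 1):
--         col = [c + v for c, v in zip(col, row)]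
--         s = sum(row[:n])
--         if best is None or s < best[1]:
--             best = (i, s)
--     j, mc = max(enumerate(col, 1), key=lambda p: p[1])
--     return [[j, mc], [best[0], best[1]]]
-- ===== Notes on version B (the rewrite author's own statement) =====
-- stated objective: alternative
-- what changed: A runs four index loops: two nested summation passes building [index,sum] pair lists for rows and columns, then two sentinel scans with +/-inf; B makes a single enumerate-driven pass that adds each row element-wise into a column vector (zip comprehension) and keeps the minimal row online without ever storing row sums, then picks the maximal column with max(enumerate(col), key=...).
-- outside the precondition, e.g. on maiorColunaMenorLinha([]): A returns [None, None], B raises ValueError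
import Mathlib
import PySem

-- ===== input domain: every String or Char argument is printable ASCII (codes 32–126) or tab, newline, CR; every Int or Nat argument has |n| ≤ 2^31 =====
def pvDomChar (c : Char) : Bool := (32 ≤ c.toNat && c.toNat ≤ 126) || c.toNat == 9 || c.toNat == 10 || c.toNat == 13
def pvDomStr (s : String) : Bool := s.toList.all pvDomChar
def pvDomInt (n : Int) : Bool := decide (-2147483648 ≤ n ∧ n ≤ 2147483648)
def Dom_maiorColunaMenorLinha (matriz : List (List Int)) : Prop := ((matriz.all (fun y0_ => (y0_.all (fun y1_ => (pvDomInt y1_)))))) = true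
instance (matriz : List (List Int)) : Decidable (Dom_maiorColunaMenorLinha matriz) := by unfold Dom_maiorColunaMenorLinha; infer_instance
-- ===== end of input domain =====

-- B replaces A's four index loops (two nested summation passes building [index,sum] pair lists,
-- then two sentinel scans) by one enumerate-driven pass that adds each row element-wise into a
-- column vector and keeps the minimal row online, plus max(enumerate(col),key) (objective: alternative).

-- ===== PORT A =====
def maiorColunaMenorLinha (matriz : List (List Int)) : List (List Int) :=
  let n : Int := matriz.length
  let somaDasLinhas : List (List Int) :=
    (PySem.List.pyRange 0 n 1).foldl (fun acc i =>
      let soma := (PySem.List.pyRange 0 n 1).foldl (fun soma j =>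
        soma + PySem.List.pyGetD (PySem.List.pyGetD matriz i []) j 0) 0
      acc ++ [[i + 1, soma]]) []
  let somaDasColunas : List (List Int) :=
    (PySem.List.pyRange 0 n 1).foldl (fun acc j =>
      let soma := (PySem.List.pyRange 0 n 1).foldl (fun soma i =>
        soma + PySem.List.pyGetD (PySem.List.pyGetD matriz i []) j 0) 0
      acc ++ [[j + 1, soma]]) []
  -- maior_coluna = -inf is modelled by Option Int (none = -inf): entries are ints, so
  -- 'soma[1] > -inf' is exactly 'the state is still none'; likewise +inf for menor_linha.
  let mc := somaDasColunas.foldl (fun (st : Option Int × Option (List Int)) soma =>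
      if (match st.1 with
          | none => true
          | some m => decide (m < PySem.List.pyGetD soma 1 0)) then
        (some (PySem.List.pyGetD soma 1 0), some soma)
      else st) (none, none)
  let ml := somaDasLinhas.foldl (fun (st : Option Int × Option (List Int)) soma =>
      if (match st.1 with
          | none => true
          | some m => decide (PySem.List.pyGetD soma 1 0 < m)) then
        (some (PySem.List.pyGetD soma 1 0), some soma)
      else st) (none, none)
  [mc.2.getD [], ml.2.getD []]

-- ===== PORT B =====
def maiorColunaMenorLinha_alt (matriz : List (List Int)) : List (List Int) :=
  let n : Int := matriz.length
  let st := (PySem.List.enumerate matriz 1).foldl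
    (fun (st : List Int × Option (Int × Int)) p =>
      ((st.1.zip p.2).map (fun q => q.1 + q.2),
       let s := (PySem.List.slice p.2 none (some n)).sum
       match st.2 with
       | none => some (p.1, s)
       | some b => if s < b.2 then some (p.1, s) else some b))
    (List.replicate matriz.length 0, none)
  -- max of the empty column vector raises ValueError in Python (empty matrix, outside Pre_);
  -- the port returns [] there
  match PySem.List.max? (PySem.List.enumerate st.1 1) (fun p => p.2), st.2 with
  | some m, some b => [[m.1, m.2], [b.1, b.2]]
  | _, _ => []

-- ===== PRECONDITION & SPEC =====
-- Pre_ excludes the empty matrix, on which A returns [None, None] (not lists of ints, outside the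
-- declared return type; B raises ValueError there), and ragged matrices with a row shorter than
-- len(matriz), on which A raises IndexError.
def Pre_maiorColunaMenorLinha (matriz : List (List Int)) : Prop :=
  matriz ≠ [] ∧ ∀ row ∈ matriz, matriz.length ≤ row.length
instance (matriz : List (List Int)) : Decidable (Pre_maiorColunaMenorLinha matriz) := by
  unfold Pre_maiorColunaMenorLinha; infer_instance
def pvWitness_maiorColunaMenorLinha : List (List Int) := [[1, 2], [3, 4]]

def Spec_maiorColunaMenorLinha (matriz : List (List Int)) (out : List (List Int)) : Prop := out = maiorColunaMenorLinha_alt matriz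
instance (matriz : List (List Int)) (out : List (List Int)) : Decidable (Spec_maiorColunaMenorLinha matriz out) := by unfold Spec_maiorColunaMenorLinha; infer_instance

-- ===== CLAIM (what is proved, stated in full; the proofs are below) =====
def Claim_equal_maiorColunaMenorLinha : Prop := ∀ (matriz : List (List Int)), Dom_maiorColunaMenorLinha matriz → Pre_maiorColunaMenorLinha matriz → Spec_maiorColunaMenorLinha matriz (maiorColunaMenorLinha matriz)

-- ===== LEMMAS AND PROOFS =====

-- the (totalized) matrix entry at row i, column j
def pvG (matriz : List (List Int)) (i j : Int) : Int :=
  PySem.List.pyGetD (PySem.List.pyGetD matriz i []) j 0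

-- proof-side names for A's sums and sentinel scan
def pvRowsum (matriz : List (List Int)) (i : Int) : Int :=
  (PySem.List.pyRange 0 (matriz.length : Int) 1).foldl (fun soma j => soma + pvG matriz i j) 0

def pvColsum (matriz : List (List Int)) (j : Int) : Int :=
  (PySem.List.pyRange 0 (matriz.length : Int) 1).foldl (fun soma i => soma + pvG matriz i j) 0

def pvScanStep (r : Int → Int → Bool) (st : Option Int × Option (List Int)) (soma : List Int) :
    Option Int × Option (List Int) :=
  if (match st.1 with
      | none => true
      | some m => r m (PySem.List.pyGetD soma 1 0)) then
    (some (PySem.List.pyGetD soma 1 0), some soma)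
  else st

def pvBestB (f : Int → Int) (r : Int → Int → Bool) (n : Int) : Int :=
  (PySem.List.pyRange 1 n 1).foldl (fun b k => if r (f b) (f k) then k else b) 0

theorem pvPair (a b : Int) : PySem.List.pyGetD [a, b] 1 0 = b := rfl

-- scan lemma: A's sentinel fold over [index+1, value] pairs tracks a best-index fold
theorem pvScan (f : Int → Int) (r : Int → Int → Bool) :
    ∀ (l : List Int) (b : Int),
    l.foldl (fun (st : Option Int × Option (List Int)) k =>
        if (match st.1 with
            | none => true
            | some m => r m (f k)) then (some (f k), some [k + 1, f k]) else st)
      (some (f b), some [b + 1, f b])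
    = (some (f (l.foldl (fun b k => if r (f b) (f k) then k else b) b)),
       some [(l.foldl (fun b k => if r (f b) (f k) then k else b) b) + 1,
             f (l.foldl (fun b k => if r (f b) (f k) then k else b) b)]) := by
  intro l
  induction l with
  | nil => intro b; rfl
  | cons k t ih =>
      intro b
      simp only [List.foldl_cons]
      by_cases hc : r (f b) (f k) = true
      · simp only [if_pos hc]; exact ih k
      · simp only [if_neg hc]; exact ih b

-- A's sentinel scan over the [index+1, value] pair list equals a best-index fold
theorem pvScanFull (f : Int → Int) (r : Int → Int → Bool) (n : Int) (hn : 0 < n) :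
    (((PySem.List.pyRange 0 n 1).map (fun k => [k + 1, f k])).foldl (pvScanStep r) (none, none))
    = (some (f (pvBestB f r n)), some [pvBestB f r n + 1, f (pvBestB f r n)]) := by
  rw [List.foldl_map, PySem.List.pyRange_one_cons hn]
  simp only [List.foldl_cons, pvScanStep, pvPair, zero_add]
  exact pvScan f r (PySem.List.pyRange (0 + 1) n 1) 0

-- B's Option scan over (index+1, value) pairs tracks the same best-index fold
theorem pvOptScan (f : Int → Int) (r : Int → Int → Prop) [DecidableRel r] :
    ∀ (l : List Int) (b : Int),
    l.foldl (fun (st : Option (Int × Int)) k =>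
        match st with
        | none => some (k + 1, f k)
        | some m => if r m.2 (f k) then some (k + 1, f k) else some m)
      (some (b + 1, f b))
    = some ((l.foldl (fun b k => if r (f b) (f k) then k else b) b) + 1,
            f (l.foldl (fun b k => if r (f b) (f k) then k else b) b)) := by
  intro l
  induction l with
  | nil => intro b; rfl
  | cons k t ih =>
      intro b
      simp only [List.foldl_cons]
      by_cases hc : r (f b) (f k)
      · simp only [if_pos hc]; exact ih k
      · simp only [if_neg hc]; exact ih b

-- the best-index fold only looks at f on the scanned indices and the start
theorem pvBestCongr (f₁ f₂ : Int → Int) (r : Int → Int → Prop) [DecidableRel r] :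
    ∀ (l : List Int) (b : Int), (∀ k ∈ l, f₁ k = f₂ k) → f₁ b = f₂ b →
    l.foldl (fun b k => if r (f₁ b) (f₁ k) then k else b) b
      = l.foldl (fun b k => if r (f₂ b) (f₂ k) then k else b) b ∧
    f₁ (l.foldl (fun b k => if r (f₁ b) (f₁ k) then k else b) b)
      = f₂ (l.foldl (fun b k => if r (f₂ b) (f₂ k) then k else b) b) := by
  intro l
  induction l with
  | nil => intro b _ hb; exact ⟨rfl, hb⟩
  | cons k t ih =>
    intro b hl hb
    have hk : f₁ k = f₂ k := hl k (List.mem_cons_self)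
    have hlt : ∀ x ∈ t, f₁ x = f₂ x := fun x hx => hl x (List.mem_cons_of_mem _ hx)
    simp only [List.foldl_cons]
    by_cases hc : r (f₂ b) (f₂ k)
    · rw [if_pos (by rw [hk, hb]; exact hc), if_pos hc]
      exact ih k hlt hk
    · rw [if_neg (by rw [hk, hb]; exact hc), if_neg hc]
      exact ih b hlt hb

-- enumerate with start 1 as a map over the index range
theorem pvEnumMap {α : Type} (xs : List α) (d : α) :
    PySem.List.enumerate xs 1
      = (PySem.List.pyRange 0 (xs.length : Int) 1).map
          (fun j => (j + 1, PySem.List.pyGetD xs j d)) := by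
  apply List.ext_getElem
  · simp [PySem.List.length_enumerate, PySem.List.length_pyRange_one]
  · intro k h1 h2
    have hk : k < xs.length := by
      simpa [PySem.List.length_enumerate] using h1
    rw [PySem.List.getElem_enumerate]
    rw [List.getElem_map]
    rw [PySem.List.getElem_pyRange_one]
    have hget : PySem.List.pyGetD xs ((0 : Int) + (k : Int)) d = xs[k] := by
      rw [zero_add, PySem.List.pyGetD_natCast]
      simp [hk]
    rw [hget]
    exact Prod.ext (by omega) rfl

-- B's element-wise row accumulation: length and entries of the column vector
theorem pvColB (rows : List (List Int)) :
    ∀ (c : List Int), (∀ r ∈ rows, c.length ≤ r.length) →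
    (rows.foldl (fun c r => (c.zip r).map (fun q => q.1 + q.2)) c).length = c.length ∧
    ∀ k : Int, 0 ≤ k → k < (c.length : Int) →
      PySem.List.pyGetD (rows.foldl (fun c r => (c.zip r).map (fun q => q.1 + q.2)) c) k 0
        = PySem.List.pyGetD c k 0 + (rows.map (fun r => PySem.List.pyGetD r k 0)).sum := by
  induction rows with
  | nil => intro c _; refine ⟨rfl, ?_⟩; intro k _ _; simp
  | cons r t ih =>
    intro c hb
    have hr : c.length ≤ r.length := hb r (List.mem_cons_self)
    have hlen : ((c.zip r).map (fun q : Int × Int => q.1 + q.2)).length = c.length := by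
      simp [List.length_zip]; omega
    have hbt : ∀ x ∈ t, ((c.zip r).map (fun q : Int × Int => q.1 + q.2)).length ≤ x.length := by
      intro x hx; rw [hlen]; exact hb x (List.mem_cons_of_mem _ hx)
    obtain ⟨ih1, ih2⟩ := ih ((c.zip r).map (fun q => q.1 + q.2)) hbt
    refine ⟨?_, ?_⟩
    · simpa [hlen] using ih1
    · intro k h0 h1
      simp only [List.foldl_cons]
      rw [ih2 k h0 (by rw [hlen]; exact h1)]
      have hkc : k.toNat < c.length := by omega
      have hkr : k.toNat < r.length := by omega
      have hz : PySem.List.pyGetD ((c.zip r).map (fun q : Int × Int => q.1 + q.2)) k 0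
          = PySem.List.pyGetD c k 0 + PySem.List.pyGetD r k 0 := by
        rw [PySem.List.pyGetD_eq_getElem _ _ h0 (by rw [hlen]; exact_mod_cast h1),
            PySem.List.pyGetD_eq_getElem _ _ h0 (by exact_mod_cast h1),
            PySem.List.pyGetD_eq_getElem _ _ h0 (by exact_mod_cast (show k < (r.length:Int) by omega))]
        simp [List.getElem_zip]
      rw [hz]
      simp only [List.map_cons, List.sum_cons]
      ring

-- the first len entries of a long-enough row, as A's index map
theorem pvTakeMap (row : List Int) (t : Nat) (h : t ≤ row.length) :
    (PySem.List.pyRange 0 (t : Int) 1).map (fun j => PySem.List.pyGetD row j 0)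
      = row.take t := by
  apply List.ext_getElem
  · simp [PySem.List.length_pyRange_one]; omega
  · intro k h1 h2
    have hk : k < t := by
      simp [PySem.List.length_pyRange_one] at h1; omega
    rw [List.getElem_map, PySem.List.getElem_pyRange_one, List.getElem_take]
    rw [zero_add, PySem.List.pyGetD_natCast]
    simp [show k < row.length by omega]

-- ===== VERDICT (by name: the statement is the Claim_ definition above) =====
theorem maiorColunaMenorLinha_spec : Claim_equal_maiorColunaMenorLinha := by
  intro matriz _hDom hPre
  obtain ⟨hne, hrows⟩ := hPre
  have hlen : matriz.length ≠ 0 := fun h => hne (List.length_eq_zero_iff.mp h)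
  have hn : 0 < ((matriz.length : Int)) := by omega
  show maiorColunaMenorLinha matriz = maiorColunaMenorLinha_alt matriz
  -- A in closed form: two sentinel scans over [index+1, sum] pair lists
  have hA : maiorColunaMenorLinha matriz =
      [((((PySem.List.pyRange 0 (matriz.length : Int) 1).map
            (fun j => [j + 1, pvColsum matriz j])).foldl
            (pvScanStep (fun m v => decide (m < v))) (none, none)).2.getD []),
       ((((PySem.List.pyRange 0 (matriz.length : Int) 1).map
            (fun i => [i + 1, pvRowsum matriz i])).foldl
            (pvScanStep (fun m v => decide (v < m))) (none, none)).2.getD [])] := by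
    unfold maiorColunaMenorLinha
    simp only [PySem.List.foldl_append_singleton_eq_map, List.nil_append]
    rfl
  rw [hA, pvScanFull (pvColsum matriz) (fun m v => decide (m < v)) (matriz.length : Int) hn,
      pvScanFull (pvRowsum matriz) (fun m v => decide (v < m)) (matriz.length : Int) hn]
  simp only [Option.getD_some]
  -- B: split the fused fold into its two independent accumulators
  simp only [maiorColunaMenorLinha_alt]
  rw [PySem.List.foldl_prod_mk
      (f := fun (c : List Int) (p : Int × List Int) => (c.zip p.2).map (fun q => q.1 + q.2))
      (g := fun (o : Option (Int × Int)) (p : Int × List Int) =>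
        match o with
        | none => some (p.1, (PySem.List.slice p.2 none (some (matriz.length : Int))).sum)
        | some b => if (PySem.List.slice p.2 none (some (matriz.length : Int))).sum < b.2 then
            some (p.1, (PySem.List.slice p.2 none (some (matriz.length : Int))).sum) else some b)]
  -- the column vector: a fold over the rows themselves
  rw [show (PySem.List.enumerate matriz 1).foldl
        (fun (c : List Int) (p : Int × List Int) => (c.zip p.2).map (fun q => q.1 + q.2))
        (List.replicate matriz.length 0)
      = matriz.foldl (fun (c : List Int) (r : List Int) => (c.zip r).map (fun q => q.1 + q.2))
        (List.replicate matriz.length 0) from by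
    have h1 := List.foldl_map (f := fun p : Int × List Int => p.2)
      (g := fun (c : List Int) (r : List Int) => List.map (fun q : Int × Int => q.1 + q.2) (c.zip r))
      (l := PySem.List.enumerate matriz 1) (init := List.replicate matriz.length 0)
    rw [PySem.List.map_snd_enumerate] at h1
    exact h1.symm]
  set C0 := matriz.foldl (fun (c : List Int) (r : List Int) => (c.zip r).map (fun q => q.1 + q.2))
      (List.replicate matriz.length 0) with hC0
  obtain ⟨hClen, hCget⟩ := pvColB matriz (List.replicate matriz.length 0)
      (by intro r hr; simpa using hrows r hr)
  rw [← hC0] at hClen hCget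
  rw [List.length_replicate] at hClen hCget
  -- the online row minimum: an Option scan over the index range
  have hBst : (PySem.List.enumerate matriz 1).foldl
        (fun (o : Option (Int × Int)) (p : Int × List Int) =>
          match o with
          | none => some (p.1, (PySem.List.slice p.2 none (some (matriz.length : Int))).sum)
          | some b => if (PySem.List.slice p.2 none (some (matriz.length : Int))).sum < b.2 then
              some (p.1, (PySem.List.slice p.2 none (some (matriz.length : Int))).sum) else some b)
        none
      = some (((PySem.List.pyRange 1 (matriz.length : Int) 1).foldl
            (fun b k => if (PySem.List.slice (PySem.List.pyGetD matriz k []) none (some (matriz.length : Int))).sum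
                < (PySem.List.slice (PySem.List.pyGetD matriz b []) none (some (matriz.length : Int))).sum
                then k else b) 0) + 1,
          (PySem.List.slice (PySem.List.pyGetD matriz
            ((PySem.List.pyRange 1 (matriz.length : Int) 1).foldl
              (fun b k => if (PySem.List.slice (PySem.List.pyGetD matriz k []) none (some (matriz.length : Int))).sum
                < (PySem.List.slice (PySem.List.pyGetD matriz b []) none (some (matriz.length : Int))).sum
                then k else b) 0) []) none (some (matriz.length : Int))).sum) := by
    rw [pvEnumMap matriz ([] : List Int), List.foldl_map, PySem.List.pyRange_one_cons hn]
    simp only [List.foldl_cons]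
    rw [show PySem.List.pyRange ((0 : Int) + 1) (matriz.length : Int) 1
          = PySem.List.pyRange 1 (matriz.length : Int) 1 by norm_num]
    have hs := pvOptScan (fun j => (PySem.List.slice (PySem.List.pyGetD matriz j []) none (some (matriz.length : Int))).sum)
      (fun a v => v < a) (PySem.List.pyRange 1 (matriz.length : Int) 1) 0
    convert hs using 2
  rw [hBst]
  -- the column maximum: max? unfolds to the same Option scan
  have hMx : PySem.List.max? (PySem.List.enumerate C0 1) (fun p => p.2)
      = some (((PySem.List.pyRange 1 (matriz.length : Int) 1).foldl
            (fun b k => if PySem.List.pyGetD C0 b 0 < PySem.List.pyGetD C0 k 0 then k else b) 0) + 1,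
          PySem.List.pyGetD C0
            ((PySem.List.pyRange 1 (matriz.length : Int) 1).foldl
              (fun b k => if PySem.List.pyGetD C0 b 0 < PySem.List.pyGetD C0 k 0 then k else b) 0) 0) := by
    unfold PySem.List.max?
    rw [pvEnumMap C0 (0 : Int), List.foldl_map, hClen, PySem.List.pyRange_one_cons hn]
    simp only [List.foldl_cons]
    rw [show PySem.List.pyRange ((0 : Int) + 1) (matriz.length : Int) 1
          = PySem.List.pyRange 1 (matriz.length : Int) 1 by norm_num]
    have hs := pvOptScan (fun j => PySem.List.pyGetD C0 j 0) (fun a v => a < v)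
      (PySem.List.pyRange 1 (matriz.length : Int) 1) 0
    convert hs using 2
    funext o k
    cases o <;> rfl
  rw [hMx]
  -- entry-wise agreement of the two programs' sums
  have hzero : ∀ k : Int, 0 ≤ k → k < (matriz.length : Int) →
      PySem.List.pyGetD (List.replicate matriz.length (0 : Int)) k 0 = 0 := by
    intro k h0 h1
    rw [PySem.List.pyGetD_eq_getElem _ _ h0 (by simpa using h1)]
    exact List.getElem_replicate _
  have hcol : ∀ k : Int, 0 ≤ k → k < (matriz.length : Int) →
      PySem.List.pyGetD C0 k 0 = pvColsum matriz k := by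
    intro k h0 h1
    rw [hCget k h0 h1, hzero k h0 h1, zero_add, pvColsum]
    rw [show (fun (soma : Int) (i : Int) => soma + pvG matriz i k)
          = (fun (soma : Int) (i : Int) => soma + PySem.List.pyGetD (PySem.List.pyGetD matriz i []) k 0) from rfl]
    rw [PySem.List.foldl_pyRange_zero_pyGetD' matriz ([] : List Int)
          (fun (acc : Int) (row : List Int) => acc + PySem.List.pyGetD row k 0) 0]
    rw [PySem.List.foldl_add, zero_add]
  have hrow : ∀ k : Int, 0 ≤ k → k < (matriz.length : Int) →
      (PySem.List.slice (PySem.List.pyGetD matriz k []) none (some (matriz.length : Int))).sum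
        = pvRowsum matriz k := by
    intro k h0 h1
    have hkm : PySem.List.pyGetD matriz k [] ∈ matriz := by
      rw [PySem.List.pyGetD_eq_getElem _ _ h0 (by simpa using h1)]
      exact List.getElem_mem _
    have hlenr : matriz.length ≤ (PySem.List.pyGetD matriz k []).length := hrows _ hkm
    rw [PySem.List.slice_to_natCast, pvRowsum,
        PySem.List.foldl_add, zero_add, ← pvTakeMap _ _ hlenr]
    rfl
  -- transfer the best-index folds from B's lookups to A's sums
  have hmemrange : ∀ k ∈ PySem.List.pyRange 1 (matriz.length : Int) 1,
      0 ≤ k ∧ k < (matriz.length : Int) := by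
    intro k hk
    have := PySem.List.mem_pyRange_one.mp hk
    omega
  have hbc := pvBestCongr (fun k => PySem.List.pyGetD C0 k 0) (pvColsum matriz)
      (fun m v => m < v) (PySem.List.pyRange 1 (matriz.length : Int) 1) 0
      (fun k hk => hcol k (hmemrange k hk).1 (hmemrange k hk).2)
      (hcol 0 le_rfl hn)
  have hbr := pvBestCongr
      (fun k => (PySem.List.slice (PySem.List.pyGetD matriz k []) none (some (matriz.length : Int))).sum)
      (pvRowsum matriz)
      (fun m v => v < m) (PySem.List.pyRange 1 (matriz.length : Int) 1) 0
      (fun k hk => hrow k (hmemrange k hk).1 (hmemrange k hk).2)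
      (hrow 0 le_rfl hn)
  simp only [pvBestB, decide_eq_true_eq]
  beta_reduce at hbc hbr
  rw [hbc.2, hbr.2, hbc.1, hbr.1]
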